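-- pv_equiv track=rewrite | github.com/kfritsch/masterarbeit | test-scripts/sultanAlign/util.py | findAllCommonContiguousSublists
-- ===== SOURCE A (Python) =====
-- def isSublist(A, B):
--     sub = True
--     for item in A:
--         if item not in B:
--             sub = False
--             break
--     return sub
--
-- def findAllCommonContiguousSublists(A, B, turnToLowerCases=True):
--     a = []
--     b = []
--     for item in A:
--         a.append(item)
--     for item in B:
--         b.append(item)
--
--     if turnToLowerCases:
--         for i in range(len(a)):
--             a[i] = a[i].lower()
--         for i in range(len(b)):
--             b[i] = b[i].lower()
--     commonContiguousSublists = []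
--     swapped = False
--     if len(a) > len(b):
--         temp = a
--         a = b
--         b = temp
--         swapped = True
--     maxSize = len(a)
--     for size in range(maxSize, 0, -1):
--         startingIndicesForA = [item for item in range(0, len(a)-size+1)]
--         startingIndicesForB = [item for item in range(0, len(b)-size+1)]
--         for i in startingIndicesForA:
--             for j in startingIndicesForB:
--                 if a[i:i+size] == b[j:j+size]:
--                     # check if a contiguous superset has already been inserted; don't insert this one in that case
--                     alreadyInserted = False
--                     currentAIndices = [item for item in range(i,i+size)]
--                     currentBIndices = [item for item in range(j,j+size)]
--                     for item in commonContiguousSublists: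
--                         if isSublist(currentAIndices, item[0]) and isSublist(currentBIndices, item[1]):
--                             alreadyInserted = True
--                             break
--                     if not alreadyInserted:
--                         commonContiguousSublists.append([currentAIndices, currentBIndices])
--
--     if swapped:
--         for item in commonContiguousSublists:
--             temp = item[0]
--             item[0] = item[1]
--             item[1] = temp
--
--     return commonContiguousSublists
-- ===== SOURCE B (Python) =====
-- def findAllCommonContiguousSublists(A, B, turnToLowerCases=True):
--     a = list(A)
--     b = list(B)
--     if turnToLowerCases:
--         a = [s.lower() for s in a]
--         b = [s.lower() for s in b]
--     swapped = len(a) > len(b)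
--     if swapped:
--         a, b = b, a
--     n, m = len(a), len(b)
--     # P[i][j] = length of the longest common prefix of a[i:] and b[j:]
--     prev = [0] * (m + 1)
--     P = [prev]
--     for i in range(n - 1, -1, -1):
--         row = [prev[j + 1] + 1 if a[i] == b[j] else 0 for j in range(m)] + [0]
--         P.append(row)
--         prev = row
--     P.reverse()
--     result = []
--     spans = []
--     for size in range(n, 0, -1):
--         for i in range(0, n - size + 1):
--             for j in range(0, m - size + 1):
--                 if P[i][j] >= size:
--                     if not any(i0 <= i and i + size <= i0 + s and j0 <= j and j + size <= j0 + s
--                                for (i0, j0, s) in spans):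
--                         spans.append((i, j, size))
--                         result.append([list(range(i, i + size)), list(range(j, j + size))])
--     if swapped:
--         for item in result:
--             item[0], item[1] = item[1], item[0]
--     return result
-- ===== Notes on version B (the rewrite author's own statement) =====
-- stated objective: faster
-- what changed: B precomputes a common-prefix-length DP table so each slice comparison becomes one table lookup, and replaces the element-by-element contiguous-superset scan with O(1) interval arithmetic on stored (i, j, size) spans, keeping A's insertion order and dedup rule exactly.
import Mathlib
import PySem

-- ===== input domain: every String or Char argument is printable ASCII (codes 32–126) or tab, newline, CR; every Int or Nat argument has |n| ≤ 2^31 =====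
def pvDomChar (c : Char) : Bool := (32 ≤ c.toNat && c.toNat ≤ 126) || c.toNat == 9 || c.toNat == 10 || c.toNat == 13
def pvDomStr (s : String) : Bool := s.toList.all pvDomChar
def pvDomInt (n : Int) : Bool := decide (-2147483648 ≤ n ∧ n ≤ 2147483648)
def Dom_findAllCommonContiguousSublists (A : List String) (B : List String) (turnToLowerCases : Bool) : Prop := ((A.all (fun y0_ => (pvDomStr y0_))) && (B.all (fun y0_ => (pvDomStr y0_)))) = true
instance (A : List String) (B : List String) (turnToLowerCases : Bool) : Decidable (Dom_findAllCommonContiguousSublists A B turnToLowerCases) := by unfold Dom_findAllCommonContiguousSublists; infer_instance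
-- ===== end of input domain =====

-- B replaces A's repeated slice comparisons by a precomputed common-prefix-length table and the
-- element-by-element contiguous-superset scan by O(1) interval arithmetic on stored (i, j, size)
-- spans, keeping A's insertion order and dedup rule exactly (asymptotically faster).

-- ===== PORT A =====
-- helper isSublist: 'for item in A: if item not in B: sub=False; break' as structural recursion
def pvIsSublist (A : List Int) (B : List Int) : Bool :=
  match A with
  | [] => true
  | item :: rest => if !(B.contains item) then false else pvIsSublist rest B

-- A's dedup scan over commonContiguousSublists with break (item[0]/item[1] via pyGet?)
def pvAlreadyInserted (ca cb : List Int) : List (List (List Int)) → Bool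
  | [] => false
  | item :: rest =>
      if pvIsSublist ca ((PySem.List.pyGet? item 0).getD []) &&
         pvIsSublist cb ((PySem.List.pyGet? item 1).getD []) then true
      else pvAlreadyInserted ca cb rest

def findAllCommonContiguousSublists (A : List String) (B : List String) (turnToLowerCases : Bool) : List (List (List Int)) :=
  let a := A.foldl (fun acc item => acc ++ [item]) []
  let b := B.foldl (fun acc item => acc ++ [item]) []
  -- 'for i in range(len(a)): a[i] = a[i].lower()' : in-place elementwise update = map
  let a := if turnToLowerCases then a.map PySem.Str.lower else a
  let b := if turnToLowerCases then b.map PySem.Str.lower else b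
  let (a, b, swapped) :=
    if a.length > b.length then (b, a, true) else (a, b, false)
  let maxSize : Int := (a.length : Int)
  let ccs := (PySem.List.pyRange maxSize 0 (-1)).foldl (fun ccs size =>
    let startA := PySem.List.pyRange 0 ((a.length : Int) - size + 1) 1
    let startB := PySem.List.pyRange 0 ((b.length : Int) - size + 1) 1
    startA.foldl (fun ccs i =>
      startB.foldl (fun ccs j =>
        if PySem.List.slice a (some i) (some (i + size)) =
           PySem.List.slice b (some j) (some (j + size)) then
          let curA := PySem.List.pyRange i (i + size) 1
          let curB := PySem.List.pyRange j (j + size) 1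
          if pvAlreadyInserted curA curB ccs then ccs
          else ccs ++ [[curA, curB]]
        else ccs) ccs) ccs) []
  if swapped then
    ccs.map (fun item => [(PySem.List.pyGet? item 1).getD [], (PySem.List.pyGet? item 0).getD []])
  else ccs

-- ===== PORT B =====
def findAllCommonContiguousSublists_alt (A : List String) (B : List String) (turnToLowerCases : Bool) : List (List (List Int)) :=
  let a := A
  let b := B
  let a := if turnToLowerCases then a.map PySem.Str.lower else a
  let b := if turnToLowerCases then b.map PySem.Str.lower else b
  let swapped : Bool := a.length > b.length
  let (a, b) := if swapped then (b, a) else (a, b)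
  let n : Int := (a.length : Int)
  let m : Int := (b.length : Int)
  -- P[i][j] = longest common prefix length of a[i:] and b[j:], built row by row from row n
  let prev0 : List Int := List.replicate (m.toNat + 1) 0
  let st := (PySem.List.pyRange (n - 1) (-1) (-1)).foldl
    (fun (st : List (List Int) × List Int) i =>
      let row := ((PySem.List.pyRange 0 m 1).map (fun j =>
            if (PySem.List.pyGet? a i).getD "" = (PySem.List.pyGet? b j).getD "" then
              (PySem.List.pyGet? st.2 (j + 1)).getD 0 + 1
            else 0)) ++ [0]
      (st.1 ++ [row], row)) ([prev0], prev0)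
  let P := st.1.reverse
  let res := (PySem.List.pyRange n 0 (-1)).foldl
    (fun (st : List (List (List Int)) × List (Int × Int × Int)) size =>
      (PySem.List.pyRange 0 (n - size + 1) 1).foldl (fun st i =>
        (PySem.List.pyRange 0 (m - size + 1) 1).foldl (fun st j =>
          if (PySem.List.pyGet? ((PySem.List.pyGet? P i).getD []) j).getD 0 ≥ size then
            if st.2.any (fun sp =>
                 decide (sp.1 ≤ i) && decide (i + size ≤ sp.1 + sp.2.2) &&
                 decide (sp.2.1 ≤ j) && decide (j + size ≤ sp.2.1 + sp.2.2)) then st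
            else (st.1 ++ [[PySem.List.pyRange i (i + size) 1, PySem.List.pyRange j (j + size) 1]],
                  st.2 ++ [(i, j, size)])
          else st) st) st) ([], [])
  let result := res.1
  if swapped then
    result.map (fun item => [(PySem.List.pyGet? item 1).getD [], (PySem.List.pyGet? item 0).getD []])
  else result

-- ===== PRECONDITION & SPEC =====
def Spec_findAllCommonContiguousSublists (A : List String) (B : List String) (turnToLowerCases : Bool) (out : List (List (List Int))) : Prop := out = findAllCommonContiguousSublists_alt A B turnToLowerCases
instance (A : List String) (B : List String) (turnToLowerCases : Bool) (out : List (List (List Int))) : Decidable (Spec_findAllCommonContiguousSublists A B turnToLowerCases out) := by unfold Spec_findAllCommonContiguousSublists; infer_instance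

-- ===== CLAIM (what is proved, stated in full; the proofs are below) =====
def Claim_equal_findAllCommonContiguousSublists : Prop := ∀ (A : List String) (B : List String) (turnToLowerCases : Bool), Dom_findAllCommonContiguousSublists A B turnToLowerCases → Spec_findAllCommonContiguousSublists A B turnToLowerCases (findAllCommonContiguousSublists A B turnToLowerCases)

-- ===== LEMMAS AND PROOFS =====

-- generic simulation of two foldl loops over the same index list
theorem pvFoldlRel {α β γ : Type} (R : β → γ → Prop) (f : β → α → β) (g : γ → α → γ)
    (l : List α) (s : β) (t : γ) (h : R s t)
    (step : ∀ x, x ∈ l → ∀ s t, R s t → R (f s x) (g t x)) :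
    R (l.foldl f s) (l.foldl g t) := by
  induction l generalizing s t with
  | nil => exact h
  | cons x xs ih =>
    exact ih (f s x) (g t x) (step x (by simp) s t h)
      (fun y hy => step y (by simp [hy]))

-- longest common prefix length of two lists of strings
def pvLcp : List String → List String → Nat
  | x :: xs, y :: ys => if x = y then pvLcp xs ys + 1 else 0
  | _, _ => 0

def pvRowOf (a b : List String) (i : Nat) : List Int :=
  (List.range (b.length + 1)).map (fun j => (pvLcp (a.drop i) (b.drop j) : Int))

def pvTab (a b : List String) : List (List Int) :=
  (List.range (a.length + 1)).map (pvRowOf a b)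

def pvMk (sp : Int × Int × Int) : List (List Int) :=
  [PySem.List.pyRange sp.1 (sp.1 + sp.2.2) 1, PySem.List.pyRange sp.2.1 (sp.2.1 + sp.2.2) 1]

theorem pvLcp_nil_right (u : List String) : pvLcp u [] = 0 := by
  cases u <;> rfl

theorem pvTake_eq_iff (s : Nat) (u v : List String) (hu : s ≤ u.length) (hv : s ≤ v.length) :
    (u.take s = v.take s) ↔ s ≤ pvLcp u v := by
  induction s generalizing u v with
  | zero => simp
  | succ s ih =>
    cases u with
    | nil => simp at hu
    | cons x xs =>
      cases v with
      | nil => simp at hv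
      | cons y ys =>
        simp only [List.take_succ_cons, List.cons.injEq]
        by_cases hxy : x = y
        · subst hxy
          have hl : pvLcp (x :: xs) (x :: ys) = pvLcp xs ys + 1 := by simp [pvLcp]
          rw [hl, ih xs ys (by simpa using hu) (by simpa using hv)]
          simp only [true_and]
          omega
        · have hl : pvLcp (x :: xs) (y :: ys) = 0 := by simp [pvLcp, hxy]
          rw [hl]
          exact ⟨fun h => absurd h.1 hxy, fun h => absurd h (by omega)⟩

theorem pvIsSublist_eq_all (l B : List Int) : pvIsSublist l B = l.all (fun x => B.contains x) := by
  induction l with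
  | nil => rfl
  | cons x xs ih =>
    simp only [pvIsSublist, List.all_cons, ← ih]
    cases hB : B.contains x <;> simp

theorem pvIsSublist_range (i s i0 s0 : Int) (hs : 1 ≤ s) :
    pvIsSublist (PySem.List.pyRange i (i + s) 1) (PySem.List.pyRange i0 (i0 + s0) 1)
      = (decide (i0 ≤ i) && decide (i + s ≤ i0 + s0)) := by
  rw [pvIsSublist_eq_all, Bool.eq_iff_iff]
  simp only [List.all_eq_true, List.contains_iff_mem, PySem.List.mem_pyRange_one,
    Bool.and_eq_true, decide_eq_true_eq]
  constructor
  · intro h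
    have h1 := h i ⟨le_refl i, by omega⟩
    have h2 := h (i + s - 1) ⟨by omega, by omega⟩
    omega
  · intro h x hx
    omega

theorem pvAlready_eq_any (i j s : Int) (hs : 1 ≤ s) (spans : List (Int × Int × Int)) :
    pvAlreadyInserted (PySem.List.pyRange i (i + s) 1) (PySem.List.pyRange j (j + s) 1)
        (spans.map pvMk)
      = spans.any (fun sp =>
          decide (sp.1 ≤ i) && decide (i + s ≤ sp.1 + sp.2.2) &&
          decide (sp.2.1 ≤ j) && decide (j + s ≤ sp.2.1 + sp.2.2)) := by
  induction spans with
  | nil => rfl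
  | cons sp rest ih =>
    simp only [List.map_cons, List.any_cons, pvAlreadyInserted, pvMk]
    have h0 : (PySem.List.pyGet? [PySem.List.pyRange sp.1 (sp.1 + sp.2.2) 1,
        PySem.List.pyRange sp.2.1 (sp.2.1 + sp.2.2) 1] 0).getD [] =
        PySem.List.pyRange sp.1 (sp.1 + sp.2.2) 1 := by
      simp [PySem.List.pyGet?, PySem.List.pyIdx?]
    have h1 : (PySem.List.pyGet? [PySem.List.pyRange sp.1 (sp.1 + sp.2.2) 1,
        PySem.List.pyRange sp.2.1 (sp.2.1 + sp.2.2) 1] 1).getD [] =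
        PySem.List.pyRange sp.2.1 (sp.2.1 + sp.2.2) 1 := by
      simp [PySem.List.pyGet?, PySem.List.pyIdx?]
    rw [h0, h1, pvIsSublist_range i s sp.1 sp.2.2 hs, pvIsSublist_range j s sp.2.1 sp.2.2 hs, ih]
    cases hda : (decide (sp.1 ≤ i) && decide (i + s ≤ sp.1 + sp.2.2)) <;>
      cases hdb : (decide (sp.2.1 ≤ j) && decide (j + s ≤ sp.2.1 + sp.2.2)) <;>
        simp [hda, hdb, Bool.and_assoc]

theorem pvRowOf_len (a b : List String) : pvRowOf a b a.length = List.replicate (b.length + 1) 0 := by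
  unfold pvRowOf
  rw [show a.drop a.length = [] from List.drop_length]
  simp [List.map_const']

theorem pvRow_step (a b : List String) (i : Nat) (hi : i < a.length) :
    ((PySem.List.pyRange 0 (b.length : Int) 1).map (fun j =>
        if (PySem.List.pyGet? a (i : Int)).getD "" = (PySem.List.pyGet? b j).getD "" then
          (PySem.List.pyGet? (pvRowOf a b (i + 1)) (j + 1)).getD 0 + 1
        else 0)) ++ [0] = pvRowOf a b i := by
  have hsplit : pvRowOf a b i
      = (List.range b.length).map (fun j => (pvLcp (a.drop i) (b.drop j) : Int)) ++ [0] := by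
    unfold pvRowOf
    rw [List.range_succ, List.map_append]
    simp [List.drop_length, pvLcp_nil_right]
  rw [hsplit, PySem.List.pyRange_zero_nat, List.map_map]
  congr 1
  apply List.map_congr_left
  intro k hkm'
  have hkm : k < b.length := List.mem_range.mp hkm'
  have hga : (PySem.List.pyGet? a (i : Int)).getD "" = a[i] := by
    simp [PySem.List.pyGet?_natCast, List.getElem?_eq_getElem hi]
  have hgb : (PySem.List.pyGet? b (k : Int)).getD "" = b[k] := by
    simp [PySem.List.pyGet?_natCast, List.getElem?_eq_getElem hkm]
  have hrow : (PySem.List.pyGet? (pvRowOf a b (i + 1)) ((k : Int) + 1)).getD 0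
      = (pvLcp (a.drop (i + 1)) (b.drop (k + 1)) : Int) := by
    have hc : ((k : Int) + 1) = ((k + 1 : Nat) : Int) := by push_cast; ring
    rw [hc, PySem.List.pyGet?_natCast]
    unfold pvRowOf
    simp [Nat.succ_lt_succ hkm]
  simp only [Function.comp_apply]
  rw [hga, hgb, hrow]
  rw [← List.getElem_cons_drop hi, ← List.getElem_cons_drop hkm]
  by_cases hxy : a[i] = b[k]
  · simp [pvLcp, hxy]
  · simp [pvLcp, hxy]

theorem pvPfold (a b : List String) (k : Nat) (hk : k ≤ a.length) :
    (PySem.List.pyRange ((k : Int) - 1) (-1) (-1)).foldl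
      (fun (st : List (List Int) × List Int) i =>
        (st.1 ++ [((PySem.List.pyRange 0 ((b.length : Int)) 1).map (fun j =>
              if (PySem.List.pyGet? a i).getD "" = (PySem.List.pyGet? b j).getD "" then
                (PySem.List.pyGet? st.2 (j + 1)).getD 0 + 1
              else 0)) ++ [0]],
         ((PySem.List.pyRange 0 ((b.length : Int)) 1).map (fun j =>
              if (PySem.List.pyGet? a i).getD "" = (PySem.List.pyGet? b j).getD "" then
                (PySem.List.pyGet? st.2 (j + 1)).getD 0 + 1
              else 0)) ++ [0]))
      ((List.range (a.length + 1 - k)).map (fun t => pvRowOf a b (a.length - t)), pvRowOf a b k)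
      = ((List.range (a.length + 1)).map (fun t => pvRowOf a b (a.length - t)), pvRowOf a b 0) := by
  induction k with
  | zero =>
    rw [PySem.List.pyRange_neg_one_eq_nil (by omega)]
    simp
  | succ t ih =>
    have h1 : ((t + 1 : Nat) : Int) - 1 = (t : Int) := by push_cast; ring
    rw [h1, PySem.List.pyRange_neg_one_cons (by omega), List.foldl_cons]
    dsimp only
    rw [pvRow_step a b t (by omega)]
    have h2 : (List.range (a.length + 1 - (t + 1))).map (fun u => pvRowOf a b (a.length - u))
          ++ [pvRowOf a b t]
        = (List.range (a.length + 1 - t)).map (fun u => pvRowOf a b (a.length - u)) := by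
      rw [show a.length + 1 - t = (a.length + 1 - (t + 1)) + 1 from by omega,
        List.range_succ, List.map_append]
      congr 1
      simp only [List.map_cons, List.map_nil]
      have he : a.length - (a.length + 1 - (t + 1)) = t := by omega
      rw [he]
    rw [h2]
    exact ih (by omega)

theorem pvRev (a b : List String) :
    ((List.range (a.length + 1)).map (fun t => pvRowOf a b (a.length - t))).reverse
      = pvTab a b := by
  unfold pvTab
  apply List.ext_getElem (by simp)
  intro k hk hk'
  have hkn : k < a.length + 1 := by simpa using hk'
  simp only [List.getElem_reverse, List.getElem_map, List.getElem_range, List.length_map,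
    List.length_range]
  congr 1
  omega

theorem pvPlookup (a b : List String) (iN jN : Nat) (hi : iN ≤ a.length) (hj : jN ≤ b.length) :
    (PySem.List.pyGet? ((PySem.List.pyGet? (pvTab a b) (iN : Int)).getD []) (jN : Int)).getD 0
      = (pvLcp (a.drop iN) (b.drop jN) : Int) := by
  simp only [PySem.List.pyGet?_natCast]
  unfold pvTab pvRowOf
  simp [show iN < a.length + 1 from by omega, show jN < b.length + 1 from by omega]

theorem pvPmain (u v : List String) :
    ((PySem.List.pyRange ((u.length : Int) - 1) (-1) (-1)).foldl
      (fun (st : List (List Int) × List Int) i =>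
        (st.1 ++ [((PySem.List.pyRange 0 ((v.length : Int)) 1).map (fun j =>
              if (PySem.List.pyGet? u i).getD "" = (PySem.List.pyGet? v j).getD "" then
                (PySem.List.pyGet? st.2 (j + 1)).getD 0 + 1
              else 0)) ++ [0]],
         ((PySem.List.pyRange 0 ((v.length : Int)) 1).map (fun j =>
              if (PySem.List.pyGet? u i).getD "" = (PySem.List.pyGet? v j).getD "" then
                (PySem.List.pyGet? st.2 (j + 1)).getD 0 + 1
              else 0)) ++ [0]))
      ([List.replicate (((v.length : Int)).toNat + 1) 0], List.replicate (((v.length : Int)).toNat + 1) 0)).1.reverse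
    = pvTab u v := by
  have hini : (([List.replicate (((v.length : Int)).toNat + 1) 0], List.replicate (((v.length : Int)).toNat + 1) (0 : Int)) : List (List Int) × List Int)
      = ((List.range (u.length + 1 - u.length)).map (fun t => pvRowOf u v (u.length - t)), pvRowOf u v u.length) := by
    simp [pvRowOf_len, show u.length + 1 - u.length = 1 from by omega, List.range_succ]
  rw [hini, pvPfold u v u.length le_rfl, pvRev]

theorem pvTest_iff (a b : List String) (i j size : Int) (hs : 1 ≤ size)
    (hi0 : 0 ≤ i) (hi : i + size ≤ (a.length : Int)) (hj0 : 0 ≤ j)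
    (hj : j + size ≤ (b.length : Int)) :
    (PySem.List.slice a (some i) (some (i + size)) = PySem.List.slice b (some j) (some (j + size)))
      ↔ ((PySem.List.pyGet? ((PySem.List.pyGet? (pvTab a b) i).getD []) j).getD 0 ≥ size) := by
  lift i to ℕ using hi0 with iN
  lift j to ℕ using hj0 with jN
  lift size to ℕ using (by omega) with sN
  have hia : iN + sN ≤ a.length := by exact_mod_cast hi
  have hjb : jN + sN ≤ b.length := by exact_mod_cast hj
  rw [PySem.List.slice_natCast_add, PySem.List.slice_natCast_add]
  rw [pvPlookup a b iN jN (by omega) (by omega)]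
  rw [pvTake_eq_iff sN (a.drop iN) (b.drop jN) (by simp; omega) (by simp; omega)]
  rw [ge_iff_le, Int.ofNat_le]

theorem pvCore (a b : List String) :
    (PySem.List.pyRange ((a.length : Int)) 0 (-1)).foldl (fun ccs size =>
      (PySem.List.pyRange 0 ((a.length : Int) - size + 1) 1).foldl (fun ccs i =>
        (PySem.List.pyRange 0 ((b.length : Int) - size + 1) 1).foldl (fun ccs j =>
          if PySem.List.slice a (some i) (some (i + size)) =
             PySem.List.slice b (some j) (some (j + size)) then
            if pvAlreadyInserted (PySem.List.pyRange i (i + size) 1)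
                 (PySem.List.pyRange j (j + size) 1) ccs then ccs
            else ccs ++ [[PySem.List.pyRange i (i + size) 1, PySem.List.pyRange j (j + size) 1]]
          else ccs) ccs) ccs) []
    = ((PySem.List.pyRange ((a.length : Int)) 0 (-1)).foldl
        (fun (st : List (List (List Int)) × List (Int × Int × Int)) size =>
          (PySem.List.pyRange 0 ((a.length : Int) - size + 1) 1).foldl (fun st i =>
            (PySem.List.pyRange 0 ((b.length : Int) - size + 1) 1).foldl (fun st j =>
              if (PySem.List.pyGet? ((PySem.List.pyGet? (pvTab a b) i).getD []) j).getD 0 ≥ size then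
                if st.2.any (fun sp =>
                     decide (sp.1 ≤ i) && decide (i + size ≤ sp.1 + sp.2.2) &&
                     decide (sp.2.1 ≤ j) && decide (j + size ≤ sp.2.1 + sp.2.2)) then st
                else (st.1 ++ [[PySem.List.pyRange i (i + size) 1, PySem.List.pyRange j (j + size) 1]],
                      st.2 ++ [(i, j, size)])
              else st) st) st) ([], [])).1 := by
  refine (pvFoldlRel (fun ccs (st : List (List (List Int)) × List (Int × Int × Int)) =>
    ccs = st.1 ∧ st.1 = List.map pvMk st.2) _ _ _ _ _ ?ini ?stp).1
  case ini => exact ⟨rfl, rfl⟩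
  case stp =>
    intro size hsize s₀ t₀ hR₀
    have hsz := PySem.List.mem_pyRange_neg_one.mp hsize
    refine pvFoldlRel (fun ccs (st : List (List (List Int)) × List (Int × Int × Int)) =>
      ccs = st.1 ∧ st.1 = List.map pvMk st.2) _ _ _ _ _ hR₀ ?_
    intro i hi s₁ t₁ hR₁
    have hib := PySem.List.mem_pyRange_one.mp hi
    refine pvFoldlRel (fun ccs (st : List (List (List Int)) × List (Int × Int × Int)) =>
      ccs = st.1 ∧ st.1 = List.map pvMk st.2) _ _ _ _ _ hR₁ ?_
    intro j hj s₂ t₂ hR₂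
    have hjb := PySem.List.mem_pyRange_one.mp hj
    obtain ⟨h1, h2⟩ := hR₂
    have hiff := pvTest_iff a b i j size (by omega) (by omega) (by omega) (by omega) (by omega)
    by_cases hA : PySem.List.slice a (some i) (some (i + size)) =
        PySem.List.slice b (some j) (some (j + size))
    · rw [if_pos hA, if_pos (hiff.mp hA), h1, h2, pvAlready_eq_any i j size (by omega)]
      by_cases hc : t₂.2.any (fun sp =>
          decide (sp.1 ≤ i) && decide (i + size ≤ sp.1 + sp.2.2) &&
          decide (sp.2.1 ≤ j) && decide (j + size ≤ sp.2.1 + sp.2.2)) = true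
      · rw [if_pos hc, if_pos hc]
        exact ⟨h2.symm ▸ rfl, h2⟩
      · rw [if_neg hc, if_neg hc]
        refine ⟨rfl, ?_⟩
        rw [List.map_append]
        rfl
    · rw [if_neg hA, if_neg (fun h => hA (hiff.mpr h))]
      exact ⟨h1, h2⟩

-- ===== VERDICT (by name: the statement is the Claim_ definition above) =====
theorem findAllCommonContiguousSublists_spec : Claim_equal_findAllCommonContiguousSublists := by
  intro A B t hd
  unfold Spec_findAllCommonContiguousSublists
  unfold findAllCommonContiguousSublists findAllCommonContiguousSublists_alt
  simp only [PySem.List.foldl_append_singleton, List.nil_append]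
  by_cases hc : (if t = true then List.map PySem.Str.lower A else A).length >
      (if t = true then List.map PySem.Str.lower B else B).length
  · simp only [if_pos hc, decide_eq_true hc, if_true]
    rw [pvPmain (if t = true then List.map PySem.Str.lower B else B)
        (if t = true then List.map PySem.Str.lower A else A)]
    rw [pvCore (if t = true then List.map PySem.Str.lower B else B)
        (if t = true then List.map PySem.Str.lower A else A)]
  · simp only [if_neg hc, decide_eq_false hc, Bool.false_eq_true, if_false]
    rw [pvPmain (if t = true then List.map PySem.Str.lower A else A)
        (if t = true then List.map PySem.Str.lower B else B)]
    rw [pvCore (if t = true then List.map PySem.Str.lower A else A)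
        (if t = true then List.map PySem.Str.lower B else B)]
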